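-- pv_equiv track=rewrite | github.com/janbodnar/Jules-Test | build_complete_ebook.py | convert_md_to_typst
-- ===== SOURCE A (Python) =====
-- def convert_md_to_typst(md_content):
--     """Convert markdown content to Typst format."""
--     lines = md_content.split('\n')
--     typst_lines = []
--     in_code_block = False
--     code_lang = ""
--
--     for line in lines:
--         # Handle code blocks
--         if line.strip().startswith('```'):
--             if not in_code_block:
--                 code_lang = line.strip()[3:].strip() or 'python'
--                 in_code_block = True
--                 typst_lines.append(f'```{code_lang}')
--             else:
--                 in_code_block = False
--                 typst_lines.append('```')
--             continue
--
--         if in_code_block: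
--             typst_lines.append(line)
--             continue
--
--         # Handle headings
--         if line.startswith('# '):
--             title = line[2:].strip()
--             typst_lines.append(f'\n= {title}\n')
--         elif line.startswith('## '):
--             title = line[3:].strip()
--             typst_lines.append(f'\n== {title}\n')
--         elif line.startswith('### '):
--             title = line[4:].strip()
--             typst_lines.append(f'\n=== {title}\n')
--         elif line.startswith('---'):
--             typst_lines.append('\n#v(1em)\n')
--         else:
--             if line.strip():
--                 typst_lines.append(line)
--             else:
--                 typst_lines.append('')
--
--     return '\n'.join(typst_lines)
-- ===== SOURCE B (Python) =====
-- def _transform(line):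
--     """Typst form of one non-code, non-fence markdown line."""
--     if line.startswith('# '):
--         return '\n= ' + line[2:].strip() + '\n'
--     if line.startswith('## '):
--         return '\n== ' + line[3:].strip() + '\n'
--     if line.startswith('### '):
--         return '\n=== ' + line[4:].strip() + '\n'
--     if line.startswith('---'):
--         return '\n#v(1em)\n'
--     return line if line.strip() else ''
--
--
-- def convert_md_to_typst(md_content):
--     """Convert markdown content to Typst format."""
--     # Pass 1: cut the document into segments at the fence lines.
--     # Each segment is (is_code, lang, lines); a trailing unclosed code
--     # segment simply ends up last.
--     segments = []
--     current = []
--     in_code = False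
--     lang = ""
--     for line in md_content.split('\n'):
--         stripped = line.strip()
--         if stripped.startswith('```'):
--             segments.append((in_code, lang, current))
--             if not in_code:
--                 lang = stripped[3:].strip() or 'python'
--             in_code = not in_code
--             current = []
--         else:
--             current.append(line)
--     segments.append((in_code, lang, current))
--
--     # Pass 2: emit the segments.
--     out = []
--     last = len(segments) - 1
--     for i, (is_code, lg, seg) in enumerate(segments):
--         if is_code:
--             out.append('```' + lg)
--             out.extend(seg)
--             if i < last:        # an unclosed final code block gets no closer
--                 out.append('```')
--         else:
--             out.extend(_transform(l) for l in seg)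
--     return '\n'.join(out)
-- ===== Notes on version B (the rewrite author's own statement) =====
-- stated objective: alternative
-- what changed: Replaces A's single flag-toggling loop by a two-pass decomposition: pass 1 segments the lines into alternating text/code segments at the fence lines, pass 2 emits each segment (fence opener/closer around code segments, a pure per-line transformer for text segments) and joins once.
import Mathlib
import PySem

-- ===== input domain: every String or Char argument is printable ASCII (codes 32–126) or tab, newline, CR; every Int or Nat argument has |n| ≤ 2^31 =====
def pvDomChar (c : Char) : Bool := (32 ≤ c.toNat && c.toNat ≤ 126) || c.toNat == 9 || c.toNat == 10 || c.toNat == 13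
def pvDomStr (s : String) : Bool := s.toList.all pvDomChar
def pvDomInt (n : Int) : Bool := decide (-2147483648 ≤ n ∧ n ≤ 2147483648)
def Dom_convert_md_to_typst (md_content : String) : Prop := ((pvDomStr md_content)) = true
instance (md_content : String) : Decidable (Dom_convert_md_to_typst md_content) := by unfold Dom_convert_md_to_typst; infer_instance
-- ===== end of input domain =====

-- B replaces A's single flag-toggling loop by two passes (segment the document at the
-- fence lines, then emit each code/text segment) — objective: alternative decomposition.

-- Python truthiness of a string: `s or d`
def pyTruthyOr (s d : String) : String := if s = "" then d else s

-- ===== PORT A =====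
def aStep (st : List String × Bool × String) (line : String) :
    List String × Bool × String :=
  let acc := st.1
  let in_code_block := st.2.1
  let code_lang := st.2.2
  if PySem.Str.startswith (PySem.Str.strip line) "```" then
    if !in_code_block then
      let lang := pyTruthyOr
        (PySem.Str.strip (PySem.Str.slice (PySem.Str.strip line) (some 3) none)) "python"
      (acc ++ ["```" ++ lang], true, lang)
    else
      (acc ++ ["```"], false, code_lang)
  else if in_code_block then
    (acc ++ [line], in_code_block, code_lang)
  else if PySem.Str.startswith line "# " then
    (acc ++ ["\n= " ++ PySem.Str.strip (PySem.Str.slice line (some 2) none) ++ "\n"],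
      in_code_block, code_lang)
  else if PySem.Str.startswith line "## " then
    (acc ++ ["\n== " ++ PySem.Str.strip (PySem.Str.slice line (some 3) none) ++ "\n"],
      in_code_block, code_lang)
  else if PySem.Str.startswith line "### " then
    (acc ++ ["\n=== " ++ PySem.Str.strip (PySem.Str.slice line (some 4) none) ++ "\n"],
      in_code_block, code_lang)
  else if PySem.Str.startswith line "---" then
    (acc ++ ["\n#v(1em)\n"], in_code_block, code_lang)
  else if PySem.Str.strip line ≠ "" then
    (acc ++ [line], in_code_block, code_lang)
  else
    (acc ++ [""], in_code_block, code_lang)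

def convert_md_to_typst (md_content : String) : String :=
  PySem.Str.join "\n"
    (((PySem.Str.split? md_content "\n").getD []).foldl aStep ([], false, "")).1

-- ===== PORT B =====
-- Typst form of one non-code, non-fence markdown line
def transformLine (line : String) : String :=
  if PySem.Str.startswith line "# " then
    "\n= " ++ PySem.Str.strip (PySem.Str.slice line (some 2) none) ++ "\n"
  else if PySem.Str.startswith line "## " then
    "\n== " ++ PySem.Str.strip (PySem.Str.slice line (some 3) none) ++ "\n"
  else if PySem.Str.startswith line "### " then
    "\n=== " ++ PySem.Str.strip (PySem.Str.slice line (some 4) none) ++ "\n"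
  else if PySem.Str.startswith line "---" then "\n#v(1em)\n"
  else if PySem.Str.strip line ≠ "" then line
  else ""

-- Pass 1: cut the line list into segments (is_code, lang, lines) at the fence lines
def segPass : List String → Bool → String → List String →
    List (Bool × String × List String)
  | [], in_code, lang, current => [(in_code, lang, current)]
  | l :: ls, in_code, lang, current =>
    let stripped := PySem.Str.strip l
    if PySem.Str.startswith stripped "```" then
      let lang' := if in_code then lang else
        pyTruthyOr (PySem.Str.strip (PySem.Str.slice stripped (some 3) none)) "python"
      (in_code, lang, current) :: segPass ls (!in_code) lang' []
    else
      segPass ls in_code lang (current ++ [l])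

-- Pass 2: emit the segments; a final (unclosed) code segment gets no closing fence
def emitSegs : List (Bool × String × List String) → List String
  | [] => []
  | [(true, lg, seg)] => ("```" ++ lg) :: seg
  | [(false, _, seg)] => seg.map transformLine
  | (true, lg, seg) :: r :: rs => ("```" ++ lg) :: (seg ++ ["```"]) ++ emitSegs (r :: rs)
  | (false, _, seg) :: r :: rs => seg.map transformLine ++ emitSegs (r :: rs)

def convert_md_to_typst_alt (md_content : String) : String :=
  PySem.Str.join "\n"
    (emitSegs (segPass ((PySem.Str.split? md_content "\n").getD []) false "" []))

-- ===== PRECONDITION & SPEC =====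
def Spec_convert_md_to_typst (md_content : String) (out : String) : Prop := out = convert_md_to_typst_alt md_content
instance (md_content : String) (out : String) : Decidable (Spec_convert_md_to_typst md_content out) := by unfold Spec_convert_md_to_typst; infer_instance

-- ===== CLAIM (what is proved, stated in full; the proofs are below) =====
def Claim_equal_convert_md_to_typst : Prop := ∀ (md_content : String), Dom_convert_md_to_typst md_content → Spec_convert_md_to_typst md_content (convert_md_to_typst md_content)

-- ===== LEMMAS AND PROOFS =====

-- the part of A's output that, mid-loop, corresponds to B's still-open segment
def pend (in_code : Bool) (lang : String) (cur : List String) : List String :=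
  if in_code then ("```" ++ lang) :: cur else cur.map transformLine

theorem segPass_ne_nil (ls : List String) (b : Bool) (lg : String) (cur : List String) :
    segPass ls b lg cur ≠ [] := by
  induction ls generalizing b lg cur with
  | nil => simp [segPass]
  | cons l ls ih =>
    simp only [segPass]
    split
    · simp
    · exact ih _ _ _

theorem emitSegs_cons (s : Bool × String × List String)
    (t : List (Bool × String × List String)) (h : t ≠ []) :
    emitSegs (s :: t) =
      (if s.1 then ("```" ++ s.2.1) :: (s.2.2 ++ ["```"]) else s.2.2.map transformLine)
        ++ emitSegs t := by
  obtain ⟨r, rs, rfl⟩ := List.exists_cons_of_ne_nil h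
  obtain ⟨b, lg, seg⟩ := s
  cases b <;> simp [emitSegs]

theorem key (ls : List String) :
    ∀ (in_code : Bool) (lang : String) (cur acc : List String),
    (ls.foldl aStep (acc ++ pend in_code lang cur, in_code, lang)).1
      = acc ++ emitSegs (segPass ls in_code lang cur) := by
  induction ls with
  | nil =>
    intro in_code lang cur acc
    cases in_code <;> simp [pend, segPass, emitSegs]
  | cons l ls ih =>
    intro in_code lang cur acc
    by_cases hf : PySem.Str.startswith (PySem.Str.strip l) "```" = true
    · have hfC : PySem.Chars.startswith (PySem.Chars.strip l.toList) ['`', '`', '`'] = true := by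
        simpa using hf
      cases in_code with
      | false =>
        have hseg : segPass (l :: ls) false lang cur
            = (false, lang, cur) :: segPass ls true
                (pyTruthyOr (PySem.Str.strip
                  (PySem.Str.slice (PySem.Str.strip l) (some 3) none)) "python") [] := by
          simp [segPass, hfC]
        have hstep : aStep (acc ++ pend false lang cur, false, lang) l
            = ((acc ++ cur.map transformLine) ++ pend true
                (pyTruthyOr (PySem.Str.strip
                  (PySem.Str.slice (PySem.Str.strip l) (some 3) none)) "python") [],
               true,
               pyTruthyOr (PySem.Str.strip
                 (PySem.Str.slice (PySem.Str.strip l) (some 3) none)) "python") := by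
          simp [aStep, hfC, pend]
        rw [List.foldl_cons, hstep, ih true _ [] _, hseg,
          emitSegs_cons _ _ (segPass_ne_nil _ _ _ _)]
        simp
      | true =>
        have hseg : segPass (l :: ls) true lang cur
            = (true, lang, cur) :: segPass ls false lang [] := by
          simp [segPass, hfC]
        have hstep : aStep (acc ++ pend true lang cur, true, lang) l
            = ((acc ++ ("```" ++ lang) :: (cur ++ ["```"])) ++ pend false lang [],
               false, lang) := by
          simp [aStep, hfC, pend]
        rw [List.foldl_cons, hstep, ih false lang [] _, hseg,
          emitSegs_cons _ _ (segPass_ne_nil _ _ _ _)]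
        simp
    · have hfC : PySem.Chars.startswith (PySem.Chars.strip l.toList) ['`', '`', '`'] = false := by
        simpa using hf
      have hseg : segPass (l :: ls) in_code lang cur
          = segPass ls in_code lang (cur ++ [l]) := by
        simp [segPass, hfC]
      cases in_code with
      | true =>
        have hstep : aStep (acc ++ pend true lang cur, true, lang) l
            = (acc ++ pend true lang (cur ++ [l]), true, lang) := by
          simp [aStep, hfC, pend]
        rw [List.foldl_cons, hstep, ih, hseg]
      | false =>
        have hstep : aStep (acc ++ pend false lang cur, false, lang) l
            = (acc ++ pend false lang (cur ++ [l]), false, lang) := by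
          simp only [aStep, pend, transformLine, Bool.not_false, Bool.false_eq_true,
            if_false, List.map_append, List.map_cons, List.map_nil]
          simp [hfC]
          split_ifs <;> simp
        rw [List.foldl_cons, hstep, ih, hseg]

-- ===== VERDICT (by name: the statement is the Claim_ definition above) =====
theorem convert_md_to_typst_spec : Claim_equal_convert_md_to_typst := by
  intro md _
  unfold Spec_convert_md_to_typst convert_md_to_typst convert_md_to_typst_alt
  have h := key ((PySem.Str.split? md "\n").getD []) false "" [] []
  simp only [pend, Bool.false_eq_true, if_false, List.map_nil, List.append_nil,
    List.nil_append] at h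
  rw [h]
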